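-- pv_equiv track=rewrite | github.com/Luolingwei/LeetCode | OA/MapBox/Q1_Even Odd Operations.py | getMaximumScore
-- ===== SOURCE A (Python) =====
-- def getMaximumScore(integerArray):
--     N = len(integerArray)
--     preS = [0] * (N + 1)
--     for i in range(1, N + 1):
--         preS[i] = preS[i - 1] + integerArray[i - 1]
--     memo = [[float('-inf')] * N for _ in range(N)]
--
--     def dp(start, end, curi):
--         if memo[start][end] == float('-inf'):
--             if start == end:
--                 memo[start][end] = integerArray[start] if curi == 1 else -integerArray[start]
--             elif curi == 1:
--                 memo[start][end] = preS[end + 1] - preS[start] + max(dp(start + 1, end, 0), dp(start, end - 1, 0))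
--             else:
--                 memo[start][end] = preS[start] - preS[end + 1] + max(dp(start + 1, end, 1), dp(start, end - 1, 1))
--         return memo[start][end]
--     return dp(0, N - 1, 1)
-- ===== SOURCE B (Python) =====
-- def getMaximumScore(integerArray):
--     N = len(integerArray)
--     preS = [0]
--     for x in integerArray:
--         preS.append(preS[-1] + x)
--     prev = []
--     for L in range(1, N + 1):
--         sign = 1 if (N - L) % 2 == 0 else -1
--         if L == 1:
--             prev = [sign * integerArray[s] for s in range(N)]
--         else:
--             prev = [sign * (preS[s + L] - preS[s]) + max(prev[s + 1], prev[s])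
--                     for s in range(N - L + 1)]
--     return prev[0]
-- ===== Notes on version B (the rewrite author's own statement) =====
-- stated objective: faster
-- what changed: Replaced A's memoized top-down recursion dp(start,end,curi) over intervals by an iterative bottom-up DP over interval lengths that keeps only the previous length's row (O(N) extra space instead of A's O(N^2) memo table and recursion stack), deriving the sign from the length parity instead of threading curi.
import Mathlib
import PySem

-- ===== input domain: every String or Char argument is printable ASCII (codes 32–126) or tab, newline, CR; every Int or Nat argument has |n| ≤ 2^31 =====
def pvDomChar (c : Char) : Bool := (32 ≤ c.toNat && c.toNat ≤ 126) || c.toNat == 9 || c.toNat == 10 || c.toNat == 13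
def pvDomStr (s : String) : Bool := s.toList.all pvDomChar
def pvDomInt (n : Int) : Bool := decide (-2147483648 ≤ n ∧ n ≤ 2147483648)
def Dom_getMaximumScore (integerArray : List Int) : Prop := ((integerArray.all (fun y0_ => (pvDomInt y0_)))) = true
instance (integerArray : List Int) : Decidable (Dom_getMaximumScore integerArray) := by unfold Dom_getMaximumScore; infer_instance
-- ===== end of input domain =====

-- B replaces A's memoized top-down recursion by an iterative bottom-up DP over interval
-- lengths keeping only the previous row (objective: faster, measured).
-- ===== PORT A =====
-- A's prefix-sum loop: for i in range(1, N+1): preS[i] = preS[i-1] + integerArray[i-1];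
-- the Lean loop index i runs 0..N-1 and stands for Python's i-1.
def preSA (arr : List Int) : List Int :=
  (List.range arr.length).foldl
    (fun ps i => ps.set (i + 1) (ps.getD i 0 + arr.getD i 0))
    (List.replicate (arr.length + 1) 0)

-- A's recursive dp(start, end, curi), with gap = end - start (all indices are
-- nonnegative and in range on Pre_, so getD is exact).  A's memo table only caches
-- values (each cell is written once, always with this value), so the memoization is
-- elided: the recursion computes the same result.
def dpA (arr preS : List Int) : Nat → Nat → Int → Int
  | 0, s, c => if c = 1 then arr.getD s 0 else -(arr.getD s 0)
  | g + 1, s, c =>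
    if c = 1 then
      preS.getD (s + g + 2) 0 - preS.getD s 0 +
        max (dpA arr preS g (s + 1) 0) (dpA arr preS g s 0)
    else
      preS.getD s 0 - preS.getD (s + g + 2) 0 +
        max (dpA arr preS g (s + 1) 1) (dpA arr preS g s 1)

def getMaximumScore (integerArray : List Int) : Int :=
  dpA integerArray (preSA integerArray) (integerArray.length - 1) 0 1

-- ===== PORT B =====
-- B's prefix sums: preS = [0]; for x in arr: preS.append(preS[-1] + x)
-- (preS is always nonempty, so preS[-1] is index length-1).
def preSB (arr : List Int) : List Int :=
  arr.foldl (fun ps x => ps ++ [ps.getD (ps.length - 1) 0 + x]) [0]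

-- one outer-loop step of B; i stands for Python's L-1 (L = i+1 runs 1..N)
def stepB (arr preS : List Int) (prev : List Int) (i : Nat) : List Int :=
  let N := arr.length
  let L := i + 1
  let sign : Int := if (N - L) % 2 = 0 then 1 else -1
  if L = 1 then
    (List.range N).map (fun s => sign * arr.getD s 0)
  else
    (List.range (N - L + 1)).map (fun s =>
      sign * (preS.getD (s + L) 0 - preS.getD s 0) +
        max (prev.getD (s + 1) 0) (prev.getD s 0))

def getMaximumScore_alt (integerArray : List Int) : Int :=
  let preS := preSB integerArray
  let prev := (List.range integerArray.length).foldl (stepB integerArray preS) []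
  prev.getD 0 0

-- ===== PRECONDITION & SPEC =====
-- Pre_ excludes only the empty list, on which the Python A raises IndexError
-- (dp(0, -1, 1) indexes the empty memo table).
def Pre_getMaximumScore (integerArray : List Int) : Prop := integerArray ≠ []
instance (integerArray : List Int) : Decidable (Pre_getMaximumScore integerArray) := by
  unfold Pre_getMaximumScore; infer_instance

def pvWitness_getMaximumScore : List Int := [3, -1, 2]

def Spec_getMaximumScore (integerArray : List Int) (out : Int) : Prop := out = getMaximumScore_alt integerArray
instance (integerArray : List Int) (out : Int) : Decidable (Spec_getMaximumScore integerArray out) := by unfold Spec_getMaximumScore; infer_instance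

-- ===== CLAIM (what is proved, stated in full; the proofs are below) =====
def Claim_equal_getMaximumScore : Prop := ∀ (integerArray : List Int), Dom_getMaximumScore integerArray → Pre_getMaximumScore integerArray → Spec_getMaximumScore integerArray (getMaximumScore integerArray)

-- ===== LEMMAS AND PROOFS =====

-- the mathematical prefix-sum list both preS builders compute
def prefs (arr : List Int) : List Int :=
  (List.range (arr.length + 1)).map (fun i => (arr.take i).sum)

theorem getD_range_map (f : Nat → Int) (m i : Nat) (h : i < m) :
    ((List.range m).map f).getD i 0 = f i := by
  simp [List.getD_eq_getElem?_getD, h]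

theorem prefs_append (ys : List Int) (x : Int) :
    prefs (ys ++ [x]) = prefs ys ++ [ys.sum + x] := by
  unfold prefs
  rw [show (ys ++ [x]).length + 1 = (ys.length + 1) + 1 by simp]
  rw [List.range_succ, List.map_append]
  congr 1
  · apply List.map_congr_left
    intro i hi
    rw [List.mem_range] at hi
    rw [List.take_append_of_le_length (by omega)]
  · simp [List.take_of_length_le (by simp : (ys ++ [x]).length ≤ ys.length + 1)]

theorem preSB_eq (arr : List Int) : preSB arr = prefs arr := by
  induction arr using List.reverseRecOn with
  | nil => simp [preSB, prefs, List.range_succ]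
  | append_singleton ys x ih =>
    unfold preSB
    rw [List.foldl_append]
    show (preSB ys) ++ [(preSB ys).getD ((preSB ys).length - 1) 0 + x] = _
    rw [ih, prefs_append]
    have hlen : (prefs ys).length = ys.length + 1 := by simp [prefs]
    rw [hlen]
    simp only [Nat.add_sub_cancel]
    rw [show (prefs ys).getD ys.length 0 = ys.sum by
      unfold prefs; rw [getD_range_map _ _ _ (by omega)]; simp]

theorem preSA_inv (arr : List Int) (k : Nat) (hk : k ≤ arr.length) :
    (List.range k).foldl
      (fun ps i => ps.set (i + 1) (ps.getD i 0 + arr.getD i 0))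
      (List.replicate (arr.length + 1) 0)
    = (List.range (k + 1)).map (fun i => (arr.take i).sum)
      ++ List.replicate (arr.length - k) 0 := by
  induction k with
  | zero =>
    simp only [List.range_zero, List.foldl_nil, List.range_succ, List.range_zero,
      List.map_append, List.map_nil, List.map_cons, List.take_zero, List.sum_nil]
    rw [show arr.length + 1 = 1 + (arr.length - 0) by omega]
    rw [List.replicate_add]
    rfl
  | succ k ih =>
    have hkn : k < arr.length := by omega
    rw [List.range_succ, List.foldl_append, ih (by omega)]
    simp only [List.foldl_cons, List.foldl_nil]
    set M := (List.range (k + 1)).map (fun i => (arr.take i).sum) with hMdef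
    have hM : M.length = k + 1 := by simp [hMdef]
    rw [show arr.length - k = (arr.length - (k + 1)) + 1 by omega, List.replicate_succ]
    rw [List.getD_append _ _ _ k (by omega)]
    have hMk : M.getD k 0 = (arr.take k).sum := by
      rw [hMdef, getD_range_map _ _ _ (by omega)]
    rw [hMk, List.getD_eq_getElem arr 0 hkn]
    rw [List.set_append_right _ _ (by omega), hM]
    simp only [Nat.sub_self, List.set_cons_zero]
    rw [show k + 1 + 1 = (k + 1) + 1 from rfl, List.range_succ, List.map_append]
    simp [hMdef, List.sum_take_succ arr k hkn]

theorem preSA_eq (arr : List Int) : preSA arr = prefs arr := by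
  unfold preSA prefs
  rw [preSA_inv arr arr.length (le_refl _)]
  simp

-- the curi value A's recursion carries at interval length L (top level: L = N, curi = 1)
def cN (N L : Nat) : Int := if (N - L) % 2 = 0 then 1 else 0

theorem loopB_inv (arr : List Int) (g : Nat) (hg : g + 1 ≤ arr.length) :
    (List.range (g + 1)).foldl (stepB arr (prefs arr)) []
    = (List.range (arr.length - g)).map
        (fun s => dpA arr (prefs arr) g s (cN arr.length (g + 1))) := by
  induction g with
  | zero =>
    rw [show (0:Nat) + 1 = 1 from rfl, List.range_one]
    simp only [List.foldl_cons, List.foldl_nil]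
    rw [show stepB arr (prefs arr) [] 0
        = (List.range arr.length).map
            (fun s => (if (arr.length - 1) % 2 = 0 then (1:Int) else -1) * arr.getD s 0) by
      simp [stepB]]
    rw [show arr.length - 0 = arr.length from rfl]
    apply List.map_congr_left
    intro s _
    by_cases h : (arr.length - 1) % 2 = 0 <;> simp [dpA, cN, h]
  | succ g ih =>
    rw [List.range_succ, List.foldl_append, ih (by omega)]
    simp only [List.foldl_cons, List.foldl_nil]
    unfold stepB
    simp only
    rw [if_neg (by omega)]
    rw [show arr.length - (g + 1 + 1) + 1 = arr.length - (g + 1) by omega]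
    apply List.map_congr_left
    intro s hs
    rw [List.mem_range] at hs
    rw [getD_range_map _ _ (s + 1) (by omega), getD_range_map _ _ s (by omega)]
    by_cases h : (arr.length - (g + 1 + 1)) % 2 = 0
    · have hc2 : cN arr.length (g + 1 + 1) = 1 := by simp [cN, h]
      have hc1 : cN arr.length (g + 1) = 0 := by
        unfold cN
        rw [if_neg (by omega)]
      rw [if_pos h, hc1, hc2]
      rw [show dpA arr (prefs arr) (g + 1) s 1
          = (prefs arr).getD (s + g + 2) 0 - (prefs arr).getD s 0 +
              max (dpA arr (prefs arr) g (s + 1) 0) (dpA arr (prefs arr) g s 0) by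
        simp [dpA]]
      rw [show s + (g + 1 + 1) = s + g + 2 by omega]
      ring
    · have hc2 : cN arr.length (g + 1 + 1) = 0 := by simp [cN, h]
      have hc1 : cN arr.length (g + 1) = 1 := by
        unfold cN
        rw [if_pos (by omega)]
      rw [if_neg h, hc1, hc2]
      rw [show dpA arr (prefs arr) (g + 1) s 0
          = (prefs arr).getD s 0 - (prefs arr).getD (s + g + 2) 0 +
              max (dpA arr (prefs arr) g (s + 1) 1) (dpA arr (prefs arr) g s 1) by
        simp [dpA]]
      rw [show s + (g + 1 + 1) = s + g + 2 by omega]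
      ring

theorem main_eq (arr : List Int) (h : arr ≠ []) :
    getMaximumScore arr = getMaximumScore_alt arr := by
  have hN : 1 ≤ arr.length := List.length_pos_iff.mpr h
  show dpA arr (preSA arr) (arr.length - 1) 0 1
      = ((List.range arr.length).foldl (stepB arr (preSB arr)) []).getD 0 0
  rw [preSA_eq, preSB_eq]
  rw [show arr.length = (arr.length - 1) + 1 by omega]
  rw [loopB_inv arr (arr.length - 1) (by omega)]
  rw [show arr.length - (arr.length - 1) = 1 by omega, List.range_one]
  simp only [List.map_cons, List.map_nil, List.getD_cons_zero]
  rw [show arr.length - 1 + 1 - 1 = arr.length - 1 by omega]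
  rw [show cN arr.length (arr.length - 1 + 1) = 1 by
    unfold cN; rw [if_pos (by omega)]]

-- ===== VERDICT (by name: the statement is the Claim_ definition above) =====
theorem getMaximumScore_spec : Claim_equal_getMaximumScore := by
  intro arr _ hpre
  unfold Spec_getMaximumScore
  exact main_eq arr hpre
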